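-- pv_equiv track=rewrite | github.com/INFORM-Africa/AI-viral-lineage-classification | src_aurel/feature_extraction/murugaiah_et_al.py | _feature_based_on_bases_frequency
-- ===== SOURCE A (Python) =====
-- from collections import Counter
-- from typing import Iterable, Tuple
-- import itertools
--
-- def _feature_based_on_bases_frequency(sequence:str) -> Tuple[float, ...]:
--     bases = ['A', 'C', 'G', 'T']
--
--     # N Count
--     n_count = sequence.count('N') # 1 feature
--
--     # Base count
--     bases_occurrences_dict = Counter(sequence)
--     bases_occurrences = [bases_occurrences_dict[base] for base in bases] # 4 features
--
--     # Dimer Count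
--     dimers = [''.join(pair) for pair in itertools.product(bases, repeat=2)]
--     dimers_occurrences_dict = Counter(sequence[i:i + 2] for i in range(len(sequence) - 1))
--     dimers_occurrences = [dimers_occurrences_dict[dimer] for dimer in dimers] # 16 features
--
--     # Codon Count
--     codons = [''.join(triplet) for triplet in itertools.product(bases, repeat=3)]
--     codons_occurrences_dict = Counter(sequence[i:i + 3] for i in range(len(sequence) - 2))
--     codons_occurrences = [codons_occurrences_dict[codon] for codon in codons] # 64 features
--
--     f2 = (n_count, *bases_occurrences, *dimers_occurrences, *codons_occurrences)
--     return f2 # 85 features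
-- ===== SOURCE B (Python) =====
-- def _feature_based_on_bases_frequency(sequence):
--     bases = ['A', 'C', 'G', 'T']
--     n_count = 0
--     singles = {}
--     dimers = {}
--     codons = {}
--     prev1 = None  # previous character
--     prev2 = None  # character before that
--     for c in sequence:
--         if c == 'N':
--             n_count += 1
--         singles[c] = singles.get(c, 0) + 1
--         if prev1 is not None:
--             d = prev1 + c
--             dimers[d] = dimers.get(d, 0) + 1
--             if prev2 is not None:
--                 t = prev2 + d
--                 codons[t] = codons.get(t, 0) + 1
--         prev2, prev1 = prev1, c
--     out = [n_count]
--     out.extend(singles.get(b, 0) for b in bases)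
--     out.extend(dimers.get(a + b, 0) for a in bases for b in bases)
--     out.extend(codons.get(a + b + c, 0) for a in bases for b in bases for c in bases)
--     return tuple(out)
-- ===== Notes on version B (the rewrite author's own statement) =====
-- stated objective: alternative
-- what changed: A scans the sequence three separate times building three Counters (plus a .count call for 'N'); B makes one pass over the string with a two-character look-back window, maintaining the N-counter and the single/dimer/codon count tables simultaneously, then reads the 85 features out of those tables.
import Mathlib
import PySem

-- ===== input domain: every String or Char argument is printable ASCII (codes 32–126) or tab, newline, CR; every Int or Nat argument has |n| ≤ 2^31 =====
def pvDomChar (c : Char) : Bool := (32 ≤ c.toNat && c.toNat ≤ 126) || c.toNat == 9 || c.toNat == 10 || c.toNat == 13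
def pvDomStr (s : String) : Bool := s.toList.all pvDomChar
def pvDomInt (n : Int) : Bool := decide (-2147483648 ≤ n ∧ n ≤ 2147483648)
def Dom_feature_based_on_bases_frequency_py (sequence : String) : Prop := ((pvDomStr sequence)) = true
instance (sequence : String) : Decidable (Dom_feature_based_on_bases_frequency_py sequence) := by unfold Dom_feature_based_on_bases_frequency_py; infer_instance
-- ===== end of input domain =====

-- B replaces A's three Counter scans of the string by ONE pass that maintains the three
-- count tables (singles / dimers / codons) and the N-counter together, using a two-character
-- look-back window; same 85-component result. Objective: alternative decomposition (single pass).

-- ===== PORT A =====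
def feature_based_on_bases_frequency_py (sequence : String) : List Int :=
  let bases : List Char := ['A', 'C', 'G', 'T']
  let s := sequence.toList
  -- n_count = sequence.count('N')
  let n_count : Int := (PySem.Str.count sequence "N" : Int)
  -- bases_occurrences_dict = Counter(sequence)
  let bases_occurrences_dict := PySem.Dict.counter s
  let bases_occurrences := bases.map (fun base => bases_occurrences_dict.getD base 0)
  -- dimers = [''.join(pair) for pair in product(bases, repeat=2)]
  let dimers : List (List Char) := bases.flatMap (fun a => bases.map (fun b => [a, b]))
  -- Counter(sequence[i:i+2] for i in range(len(sequence)-1))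
  let dimers_occurrences_dict := PySem.Dict.counter
    ((PySem.List.pyRange 0 ((s.length : Int) - 1) 1).map
      (fun i => PySem.List.slice s (some i) (some (i + 2))))
  let dimers_occurrences := dimers.map (fun d => dimers_occurrences_dict.getD d 0)
  -- codons = [''.join(triplet) for triplet in product(bases, repeat=3)]
  let codons : List (List Char) := bases.flatMap (fun a => bases.flatMap (fun b => bases.map (fun c => [a, b, c])))
  -- Counter(sequence[i:i+3] for i in range(len(sequence)-2))
  let codons_occurrences_dict := PySem.Dict.counter
    ((PySem.List.pyRange 0 ((s.length : Int) - 2) 1).map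
      (fun i => PySem.List.slice s (some i) (some (i + 3))))
  let codons_occurrences := codons.map (fun c => codons_occurrences_dict.getD c 0)
  n_count :: (bases_occurrences ++ dimers_occurrences ++ codons_occurrences)

-- ===== PORT B =====
-- loop body of Source B: state = (n_count, singles, dimers, codons, prev1, prev2)
def fbbfStep
    (st : Int × PySem.Dict Char Int × PySem.Dict (List Char) Int × PySem.Dict (List Char) Int × Option Char × Option Char)
    (c : Char) :
    Int × PySem.Dict Char Int × PySem.Dict (List Char) Int × PySem.Dict (List Char) Int × Option Char × Option Char :=
  let (n_count, singles, dimers, codons, prev1, prev2) := st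
  let n_count := if c == 'N' then n_count + 1 else n_count
  let singles := singles.insert c (singles.getD c 0 + 1)
  let (dimers, codons) :=
    match prev1 with
    | none => (dimers, codons)
    | some p1 =>
      let d := [p1, c]
      let dimers := dimers.insert d (dimers.getD d 0 + 1)
      let codons :=
        match prev2 with
        | none => codons
        | some p2 => codons.insert (p2 :: d) (codons.getD (p2 :: d) 0 + 1)
      (dimers, codons)
  (n_count, singles, dimers, codons, some c, prev1)

def feature_based_on_bases_frequency_py_alt (sequence : String) : List Int :=
  let bases : List Char := ['A', 'C', 'G', 'T']
  let st := sequence.toList.foldl fbbfStep (0, PySem.Dict.empty, PySem.Dict.empty, PySem.Dict.empty, none, none)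
  let n_count := st.1
  let singles := st.2.1
  let dimers := st.2.2.1
  let codons := st.2.2.2.1
  n_count ::
    (bases.map (fun b => singles.getD b 0)
      ++ bases.flatMap (fun a => bases.map (fun b => dimers.getD [a, b] 0))
      ++ bases.flatMap (fun a => bases.flatMap (fun b => bases.map (fun c => codons.getD [a, b, c] 0))))

-- ===== PRECONDITION & SPEC =====
def Spec_feature_based_on_bases_frequency_py (sequence : String) (out : List Int) : Prop := out = feature_based_on_bases_frequency_py_alt sequence
instance (sequence : String) (out : List Int) : Decidable (Spec_feature_based_on_bases_frequency_py sequence out) := by unfold Spec_feature_based_on_bases_frequency_py; infer_instance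

-- ===== CLAIM (what is proved, stated in full; the proofs are below) =====
def Claim_equal_feature_based_on_bases_frequency_py : Prop := ∀ (sequence : String), Dom_feature_based_on_bases_frequency_py sequence → Spec_feature_based_on_bases_frequency_py sequence (feature_based_on_bases_frequency_py sequence)

-- ===== LEMMAS AND PROOFS =====

-- the list of 2-grams (resp. 3-grams) of a character list, A's slice list in structural form
def pvDimerGrams : List Char → List (List Char)
  | a :: b :: t => [a, b] :: pvDimerGrams (b :: t)
  | _ => []
def pvCodonGrams : List Char → List (List Char)
  | a :: b :: c :: t => [a, b, c] :: pvCodonGrams (b :: c :: t)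
  | _ => []

-- Python's s.count(sub) for a single-character sub is List.count
theorem pv_count_go_single (c : Char) : ∀ (fuel : Nat) (s : List Char) (acc : Nat), s.length ≤ fuel →
    PySem.Chars.count.go [c] fuel s acc = acc + s.count c
  | 0, s, acc, h => by
    have : s = [] := by cases s <;> simp_all
    subst this; simp [PySem.Chars.count.go]
  | fuel + 1, [], acc, h => by simp [PySem.Chars.count.go]
  | fuel + 1, hd :: t, acc, h => by
    rw [PySem.Chars.count.go]
    by_cases hc : c = hd
    · subst hc
      simp only [List.isPrefixOf, Bool.and_true, beq_self_eq_true, if_pos, List.length_cons,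
        List.length_nil, Nat.zero_add, List.drop_succ_cons, List.drop_zero]
      rw [pv_count_go_single c fuel t (acc + 1) (by simpa using h)]
      simp; omega
    · simp only [List.isPrefixOf, Bool.and_true]
      rw [if_neg (by simpa using hc)]
      rw [pv_count_go_single c fuel t acc (by simpa using h)]
      simp [Ne.symm hc]

theorem pv_count_single (s : List Char) (c : Char) :
    PySem.Chars.count s [c] = s.count c := by
  simp only [PySem.Chars.count, List.isEmpty_cons, Bool.false_eq_true, reduceIte]
  simpa using pv_count_go_single c s.length s 0 le_rfl

theorem pv_grams2 : ∀ (s : List Char),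
    (List.range (s.length - 1)).map (fun j => (s.drop j).take 2) = pvDimerGrams s
  | [] => by simp [pvDimerGrams]
  | [a] => by simp [pvDimerGrams]
  | a :: b :: t => by
    have ih := pv_grams2 (b :: t)
    simp only [List.length_cons, Nat.add_sub_cancel] at ih ⊢
    rw [List.range_succ_eq_map, List.map_cons, List.map_map]
    simp only [List.drop_zero, Function.comp_def, List.drop_succ_cons]
    rw [ih]
    simp [pvDimerGrams]

theorem pv_grams3 : ∀ (s : List Char),
    (List.range (s.length - 2)).map (fun j => (s.drop j).take 3) = pvCodonGrams s
  | [] => by simp [pvCodonGrams]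
  | [a] => by simp [pvCodonGrams]
  | [a, b] => by simp [pvCodonGrams]
  | a :: b :: c :: t => by
    have ih := pv_grams3 (b :: c :: t)
    simp only [List.length_cons] at ih ⊢
    have h1 : t.length + 1 + 1 + 1 - 2 = t.length + 1 := by omega
    have h2 : t.length + 1 + 1 - 2 = t.length := by omega
    rw [h1]; rw [h2] at ih
    rw [List.range_succ_eq_map, List.map_cons, List.map_map]
    simp only [List.drop_zero, Function.comp_def, List.drop_succ_cons]
    rw [ih]
    simp [pvCodonGrams]

-- A's dimer slice list is the 2-gram list
theorem pv_slice2_eq (s : List Char) :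
    (PySem.List.pyRange 0 ((s.length : Int) - 1) 1).map
      (fun i => PySem.List.slice s (some i) (some (i + 2))) = pvDimerGrams s := by
  cases s with
  | nil => simp [PySem.List.pyRange, pvDimerGrams]
  | cons a t =>
    have h : ((a :: t).length : Int) - 1 = ((t.length : Nat) : Int) := by simp
    rw [h, PySem.List.pyRange_zero_natCast, List.map_map]
    calc (List.range t.length).map
          (fun j : Nat => PySem.List.slice (a :: t) (some (j : Int)) (some ((j : Int) + 2)))
        = (List.range t.length).map (fun j : Nat => ((a :: t).drop j).take 2) := by
          refine List.map_congr_left (fun j _ => ?_)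
          simpa using PySem.List.slice_natCast_add (a :: t) j 2
      _ = pvDimerGrams (a :: t) := by simpa using pv_grams2 (a :: t)

-- A's codon slice list is the 3-gram list
theorem pv_slice3_eq (s : List Char) :
    (PySem.List.pyRange 0 ((s.length : Int) - 2) 1).map
      (fun i => PySem.List.slice s (some i) (some (i + 3))) = pvCodonGrams s := by
  cases s with
  | nil => simp [PySem.List.pyRange, pvCodonGrams]
  | cons a t =>
    cases t with
    | nil => simp [PySem.List.pyRange, pvCodonGrams]
    | cons b u =>
      have h : ((a :: b :: u).length : Int) - 2 = ((u.length : Nat) : Int) := by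
        simp; ring
      rw [h, PySem.List.pyRange_zero_natCast, List.map_map]
      calc (List.range u.length).map
            (fun j : Nat => PySem.List.slice (a :: b :: u) (some (j : Int)) (some ((j : Int) + 3)))
          = (List.range u.length).map (fun j : Nat => ((a :: b :: u).drop j).take 3) := by
            refine List.map_congr_left (fun j _ => ?_)
            simpa using PySem.List.slice_natCast_add (a :: b :: u) j 3
        _ = pvCodonGrams (a :: b :: u) := by simpa using pv_grams3 (a :: b :: u)

-- invariant of B's loop once the look-back window is full
theorem pv_loop_inv (cs : List Char) : ∀ (nc : Int) (d1 : PySem.Dict Char Int)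
    (d2 d3 : PySem.Dict (List Char) Int) (p1 p2 : Char),
    (cs.foldl fbbfStep (nc, d1, d2, d3, some p1, some p2)).1 = nc + (cs.count 'N' : Int) ∧
    (∀ v, (cs.foldl fbbfStep (nc, d1, d2, d3, some p1, some p2)).2.1.getD v 0 = d1.getD v 0 + (cs.count v : Int)) ∧
    (∀ k, (cs.foldl fbbfStep (nc, d1, d2, d3, some p1, some p2)).2.2.1.getD k 0 = d2.getD k 0 + ((pvDimerGrams (p1 :: cs)).count k : Int)) ∧
    (∀ k, (cs.foldl fbbfStep (nc, d1, d2, d3, some p1, some p2)).2.2.2.1.getD k 0 = d3.getD k 0 + ((pvCodonGrams (p2 :: p1 :: cs)).count k : Int)) := by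
  induction cs with
  | nil => intro nc d1 d2 d3 p1 p2; simp [pvDimerGrams, pvCodonGrams]
  | cons c rest ih =>
    intro nc d1 d2 d3 p1 p2
    simp only [List.foldl_cons]
    have hstep : fbbfStep (nc, d1, d2, d3, some p1, some p2) c =
        (if c == 'N' then nc + 1 else nc, d1.insert c (d1.getD c 0 + 1),
         d2.insert [p1, c] (d2.getD [p1, c] 0 + 1),
         d3.insert [p2, p1, c] (d3.getD [p2, p1, c] 0 + 1), some c, some p1) := rfl
    rw [hstep]
    obtain ⟨h1, h2, h3, h4⟩ := ih (if c == 'N' then nc + 1 else nc) (d1.insert c (d1.getD c 0 + 1))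
      (d2.insert [p1, c] (d2.getD [p1, c] 0 + 1)) (d3.insert [p2, p1, c] (d3.getD [p2, p1, c] 0 + 1)) c p1
    refine ⟨?_, ?_, ?_, ?_⟩
    · rw [h1, List.count_cons]
      by_cases hc : c = 'N' <;> simp [hc] <;> ring
    · intro v
      rw [h2 v, List.count_cons]
      by_cases hv : v = c
      · subst hv; rw [PySem.Dict.getD_insert_self]; simp; ring
      · rw [PySem.Dict.getD_insert_of_ne _ _ _ hv]
        simp [Ne.symm hv]
    · intro k
      rw [h3 k]
      show _ = d2.getD k 0 + ((([p1, c] :: pvDimerGrams (c :: rest)).count k : Nat) : Int)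
      rw [List.count_cons]
      by_cases hk : k = [p1, c]
      · subst hk; rw [PySem.Dict.getD_insert_self]; simp; ring
      · rw [PySem.Dict.getD_insert_of_ne _ _ _ hk]
        simp [Ne.symm hk]
    · intro k
      rw [h4 k]
      show _ = d3.getD k 0 + ((([p2, p1, c] :: pvCodonGrams (p1 :: c :: rest)).count k : Nat) : Int)
      rw [List.count_cons]
      by_cases hk : k = [p2, p1, c]
      · subst hk; rw [PySem.Dict.getD_insert_self]; simp; ring
      · rw [PySem.Dict.getD_insert_of_ne _ _ _ hk]
        simp [Ne.symm hk]

-- the four components of B's full fold, for an arbitrary string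
theorem pv_fold_spec (s : List Char) :
    (s.foldl fbbfStep (0, PySem.Dict.empty, PySem.Dict.empty, PySem.Dict.empty, none, none)).1 = (s.count 'N' : Int) ∧
    (∀ v, (s.foldl fbbfStep (0, PySem.Dict.empty, PySem.Dict.empty, PySem.Dict.empty, none, none)).2.1.getD v 0 = (s.count v : Int)) ∧
    (∀ k, (s.foldl fbbfStep (0, PySem.Dict.empty, PySem.Dict.empty, PySem.Dict.empty, none, none)).2.2.1.getD k 0 = ((pvDimerGrams s).count k : Int)) ∧
    (∀ k, (s.foldl fbbfStep (0, PySem.Dict.empty, PySem.Dict.empty, PySem.Dict.empty, none, none)).2.2.2.1.getD k 0 = ((pvCodonGrams s).count k : Int)) := by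
  cases s with
  | nil => simp [pvDimerGrams, pvCodonGrams, PySem.Dict.getD, PySem.Dict.get?, PySem.Dict.empty]
  | cons a t =>
    cases t with
    | nil =>
      refine ⟨?_, ?_, ?_, ?_⟩ <;>
        simp only [List.foldl_cons, List.foldl_nil] <;>
        [skip; intro v; intro k; intro k]
      · by_cases ha : a = 'N' <;> simp [ha, fbbfStep, List.count_cons]
      · show (PySem.Dict.empty.insert a (PySem.Dict.empty.getD a 0 + 1)).getD v 0 = _
        by_cases hv : v = a
        · subst hv; rw [PySem.Dict.getD_insert_self]
          simp [PySem.Dict.getD, PySem.Dict.get?, PySem.Dict.empty, List.count_cons]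
        · rw [PySem.Dict.getD_insert_of_ne _ _ _ hv]
          simp [PySem.Dict.getD, PySem.Dict.get?, PySem.Dict.empty, List.count_cons, Ne.symm hv]
      · simp [fbbfStep, pvDimerGrams, PySem.Dict.getD, PySem.Dict.get?, PySem.Dict.empty]
      · simp [fbbfStep, pvCodonGrams, PySem.Dict.getD, PySem.Dict.get?, PySem.Dict.empty]
    | cons b u =>
      have hfold : (a :: b :: u).foldl fbbfStep
          (0, PySem.Dict.empty, PySem.Dict.empty, PySem.Dict.empty, none, none) =
          u.foldl fbbfStep
            (fbbfStep (fbbfStep (0, PySem.Dict.empty, PySem.Dict.empty, PySem.Dict.empty, none, none) a) b) := rfl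
      have hst : fbbfStep (fbbfStep (0, PySem.Dict.empty, PySem.Dict.empty, PySem.Dict.empty, none, none) a) b =
          ((if b == 'N' then (if a == 'N' then (0 : Int) + 1 else 0) + 1 else (if a == 'N' then (0 : Int) + 1 else 0)),
           (PySem.Dict.empty.insert a (PySem.Dict.empty.getD a 0 + 1)).insert b
             ((PySem.Dict.empty.insert a (PySem.Dict.empty.getD a 0 + 1)).getD b 0 + 1),
           PySem.Dict.empty.insert [a, b] (PySem.Dict.empty.getD [a, b] 0 + 1),
           PySem.Dict.empty, some b, some a) := rfl
      obtain ⟨i1, i2, i3, i4⟩ := pv_loop_inv u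
        (if b == 'N' then (if a == 'N' then (0 : Int) + 1 else 0) + 1 else (if a == 'N' then (0 : Int) + 1 else 0))
        ((PySem.Dict.empty.insert a (PySem.Dict.empty.getD a 0 + 1)).insert b
          ((PySem.Dict.empty.insert a (PySem.Dict.empty.getD a 0 + 1)).getD b 0 + 1))
        (PySem.Dict.empty.insert [a, b] (PySem.Dict.empty.getD [a, b] 0 + 1))
        PySem.Dict.empty b a
      rw [hst] at hfold
      refine ⟨?_, ?_, ?_, ?_⟩
      · rw [hfold, i1, List.count_cons, List.count_cons]
        by_cases ha : a = 'N' <;> by_cases hb : b = 'N' <;> simp [ha, hb] <;> ring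
      · intro v
        rw [hfold, i2 v, List.count_cons, List.count_cons]
        have hemp : ∀ w : Char, PySem.Dict.empty.getD w (0 : Int) = 0 := fun _ => rfl
        by_cases hvb : v = b
        · subst hvb; rw [PySem.Dict.getD_insert_self]
          by_cases hva : v = a
          · subst hva; rw [PySem.Dict.getD_insert_self, hemp]; simp; ring
          · rw [PySem.Dict.getD_insert_of_ne _ _ _ hva, hemp]
            simp [Ne.symm hva]; ring
        · rw [PySem.Dict.getD_insert_of_ne _ _ _ hvb]
          by_cases hva : v = a
          · subst hva; rw [PySem.Dict.getD_insert_self, hemp]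
            simp [Ne.symm hvb]; ring
          · rw [PySem.Dict.getD_insert_of_ne _ _ _ hva, hemp]
            simp [Ne.symm hva, Ne.symm hvb]
      · intro k
        rw [hfold, i3 k]
        show _ = ((([a, b] :: pvDimerGrams (b :: u)).count k : Nat) : Int)
        rw [List.count_cons]
        have hemp : PySem.Dict.empty.getD k (0 : Int) = 0 := rfl
        by_cases hk : k = [a, b]
        · subst hk; rw [PySem.Dict.getD_insert_self, hemp]; simp; ring
        · rw [PySem.Dict.getD_insert_of_ne _ _ _ hk, hemp]
          simp [Ne.symm hk]
      · intro k
        rw [hfold, i4 k]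
        have hemp : PySem.Dict.empty.getD k (0 : Int) = 0 := rfl
        rw [hemp]; simp

-- ===== VERDICT (by name: the statement is the Claim_ definition above) =====
theorem feature_based_on_bases_frequency_py_spec : Claim_equal_feature_based_on_bases_frequency_py := by
  intro sequence _
  unfold Spec_feature_based_on_bases_frequency_py
  unfold feature_based_on_bases_frequency_py feature_based_on_bases_frequency_py_alt
  obtain ⟨hB1, hB2, hB3, hB4⟩ := pv_fold_spec sequence.toList
  have hN : (PySem.Str.count sequence "N" : Int) = (sequence.toList.count 'N' : Int) := by
    rw [PySem.Str.count_eq, show "N".toList = ['N'] from rfl, pv_count_single]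
  simp only [hB1, hB2, hB3, hB4, PySem.Dict.getD_counter, pv_slice2_eq, pv_slice3_eq, hN,
    List.map_flatMap, List.map_map, Function.comp_def]
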